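-- pv_equiv track=rewrite | github.com/bmountjoy/LMTools | TCD_Interface.py | rangeCheckTC
-- ===== SOURCE A (Python) =====
-- def rangeCheckTC(run_h1, h1_min, h1_max, run_h2, h2_min, h2_max, run_h3, h3_min, h3_max):
--
-- 	heights = []
--
-- 	#singles
-- 	if run_h1 :
-- 		heights.append(h1_min)
-- 		heights.append(h1_max)
--
-- 	if run_h2 :
-- 		heights.append(h2_min)
-- 		heights.append(h2_max)
--
-- 	if run_h3 :
-- 		heights.append(h3_min)
-- 		heights.append(h3_max)
--
-- 	i = 0
-- 	while i < len(heights):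
-- 		if heights[i] > heights[i+1]:
-- 			return 0
-- 		i = i + 2
--
-- 	return 1
-- ===== SOURCE B (Python) =====
-- def rangeCheckTC(run_h1, h1_min, h1_max, run_h2, h2_min, h2_max, run_h3, h3_min, h3_max):
--     # Branch-free formulation: validity of each range is a boolean implication
--     # (enabled -> min <= max); the result is the conjunction, cast to int.
--     ok1 = (not run_h1) or h1_min <= h1_max
--     ok2 = (not run_h2) or h2_min <= h2_max
--     ok3 = (not run_h3) or h3_min <= h3_max
--     return int(ok1 and ok2 and ok3)
-- ===== Notes on version B (the rewrite author's own statement) =====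
-- stated objective: simpler
-- what changed: B replaces A's build-a-flattened-list-then-stride-2-scan with early returns by a loop-free, branch-free boolean formula: each range's validity is the implication (enabled -> min <= max) and the result is the conjunction cast to int.
import Mathlib
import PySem

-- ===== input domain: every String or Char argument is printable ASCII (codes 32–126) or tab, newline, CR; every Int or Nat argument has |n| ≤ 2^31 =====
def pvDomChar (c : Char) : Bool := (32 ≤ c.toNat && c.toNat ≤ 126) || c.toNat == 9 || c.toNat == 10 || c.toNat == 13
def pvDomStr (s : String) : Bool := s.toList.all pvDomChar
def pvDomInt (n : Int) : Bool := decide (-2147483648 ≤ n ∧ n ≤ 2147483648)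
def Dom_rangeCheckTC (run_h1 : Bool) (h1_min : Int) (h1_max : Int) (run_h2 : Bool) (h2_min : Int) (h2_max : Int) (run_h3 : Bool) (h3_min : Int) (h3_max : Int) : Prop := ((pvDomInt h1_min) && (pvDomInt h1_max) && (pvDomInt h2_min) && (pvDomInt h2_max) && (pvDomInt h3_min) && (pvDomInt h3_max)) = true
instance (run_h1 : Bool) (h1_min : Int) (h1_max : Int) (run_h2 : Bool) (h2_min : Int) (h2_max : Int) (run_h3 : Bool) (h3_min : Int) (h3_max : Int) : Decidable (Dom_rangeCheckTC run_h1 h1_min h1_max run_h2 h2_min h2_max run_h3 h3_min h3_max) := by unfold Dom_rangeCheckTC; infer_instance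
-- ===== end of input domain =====

-- B replaces A's build-a-flattened-list-then-stride-2-scan by a loop-free boolean formula (enabled -> min <= max for each range, conjoined, cast to int); objective: simpler.
-- ===== PORT A =====
-- A's while loop over heights with stride 2, comparing heights[i] > heights[i+1]:
-- the list it builds always has even length, so the scan consumes two elements per step.
def pvScanPairsA : List Int → Int
  | a :: b :: rest => if a > b then 0 else pvScanPairsA rest
  | _ => 1

def rangeCheckTC (run_h1 : Bool) (h1_min : Int) (h1_max : Int) (run_h2 : Bool) (h2_min : Int) (h2_max : Int) (run_h3 : Bool) (h3_min : Int) (h3_max : Int) : Int :=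
  let heights : List Int :=
    (if run_h1 then [h1_min, h1_max] else []) ++
    (if run_h2 then [h2_min, h2_max] else []) ++
    (if run_h3 then [h3_min, h3_max] else [])
  pvScanPairsA heights

-- ===== PORT B =====
-- B: three boolean implications conjoined, cast to Int; no loop, no early return.
def rangeCheckTC_alt (run_h1 : Bool) (h1_min : Int) (h1_max : Int) (run_h2 : Bool) (h2_min : Int) (h2_max : Int) (run_h3 : Bool) (h3_min : Int) (h3_max : Int) : Int :=
  let ok1 : Bool := !run_h1 || decide (h1_min ≤ h1_max)
  let ok2 : Bool := !run_h2 || decide (h2_min ≤ h2_max)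
  let ok3 : Bool := !run_h3 || decide (h3_min ≤ h3_max)
  if ok1 && ok2 && ok3 then 1 else 0

-- ===== PRECONDITION & SPEC =====
def Spec_rangeCheckTC (run_h1 : Bool) (h1_min : Int) (h1_max : Int) (run_h2 : Bool) (h2_min : Int) (h2_max : Int) (run_h3 : Bool) (h3_min : Int) (h3_max : Int) (out : Int) : Prop := out = rangeCheckTC_alt run_h1 h1_min h1_max run_h2 h2_min h2_max run_h3 h3_min h3_max
instance (run_h1 : Bool) (h1_min : Int) (h1_max : Int) (run_h2 : Bool) (h2_min : Int) (h2_max : Int) (run_h3 : Bool) (h3_min : Int) (h3_max : Int) (out : Int) : Decidable (Spec_rangeCheckTC run_h1 h1_min h1_max run_h2 h2_min h2_max run_h3 h3_min h3_max out) := by unfold Spec_rangeCheckTC; infer_instance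

-- ===== CLAIM =====
def Claim_equal_rangeCheckTC : Prop := ∀ (run_h1 : Bool) (h1_min : Int) (h1_max : Int) (run_h2 : Bool) (h2_min : Int) (h2_max : Int) (run_h3 : Bool) (h3_min : Int) (h3_max : Int), Dom_rangeCheckTC run_h1 h1_min h1_max run_h2 h2_min h2_max run_h3 h3_min h3_max → Spec_rangeCheckTC run_h1 h1_min h1_max run_h2 h2_min h2_max run_h3 h3_min h3_max (rangeCheckTC run_h1 h1_min h1_max run_h2 h2_min h2_max run_h3 h3_min h3_max)

-- ===== LEMMAS AND PROOFS =====

-- ===== VERDICT =====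
theorem rangeCheckTC_spec : Claim_equal_rangeCheckTC := by
  intro run_h1 h1_min h1_max run_h2 h2_min h2_max run_h3 h3_min h3_max _
  unfold Spec_rangeCheckTC rangeCheckTC rangeCheckTC_alt
  cases run_h1 <;> cases run_h2 <;> cases run_h3 <;>
    simp [pvScanPairsA] <;>
    by_cases hA : h1_min ≤ h1_max <;> by_cases hB : h2_min ≤ h2_max <;>
    by_cases hC : h3_min ≤ h3_max <;> simp_all <;> omega
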